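-- pv_equiv track=rewrite | github.com/nh8157/advent-of-code | day05/part_1.py | break_maps
-- ===== SOURCE A (Python) =====
-- def break_maps(lines):
--     maps = []
--     left = 0
--     for right in range(len(lines)):
--         if lines[right] == "\n":
--             nums = [s.strip('\n').split() for s in lines[left + 1:right]]
--             for i in range(len(nums)):
--                 nums[i] = [int(n) for n in nums[i]]
--             maps.append(nums)
--             left = right + 1
--         elif right == len(lines) - 1:
--             nums = [s.strip('\n').split() for s in lines[left + 1:right + 1]]
--             for i in range(len(nums)):
--                 nums[i] = [int(n) for n in nums[i]]
--             maps.append(nums)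
--     return maps
-- ===== SOURCE B (Python) =====
-- def break_maps(lines):
--     maps = []
--     group = []
--     for line in lines:
--         if line == "\n":
--             maps.append([[int(n) for n in s.split()] for s in group[1:]])
--             group = []
--         else:
--             group.append(line)
--     if group:
--         maps.append([[int(n) for n in s.split()] for s in group[1:]])
--     return maps
-- ===== Notes on version B (the rewrite author's own statement) =====
-- stated objective: simpler
-- what changed: single accumulator pass that collects each block's lines in a running group and flushes group[1:] on every blank line (and once at the end if non-empty), replacing A's index loop with a left pointer, slicing, a two-step parse and a special last-index branch
import Mathlib
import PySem

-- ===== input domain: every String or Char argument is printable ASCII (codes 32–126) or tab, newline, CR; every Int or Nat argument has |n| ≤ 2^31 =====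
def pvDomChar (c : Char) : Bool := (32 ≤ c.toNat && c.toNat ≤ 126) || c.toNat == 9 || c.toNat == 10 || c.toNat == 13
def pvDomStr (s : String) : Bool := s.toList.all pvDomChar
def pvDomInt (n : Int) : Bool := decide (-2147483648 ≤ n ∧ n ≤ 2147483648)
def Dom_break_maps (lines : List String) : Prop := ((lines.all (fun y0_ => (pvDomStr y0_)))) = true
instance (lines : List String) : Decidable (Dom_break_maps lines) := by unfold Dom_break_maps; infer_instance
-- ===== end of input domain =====

-- B replaces A's index loop + left pointer + slices + special last-index branch by one
-- accumulator pass over the lines, flushing the collected group on each blank line.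

-- ===== PORT A =====
-- the two-step parse A performs on a slice: token lists first, then each row to ints
-- (int(n) raises ValueError on a bad token: Pre_ excludes those inputs; the getD 0 is unreachable inside Pre_)
def parseLinesA (xs : List String) : List (List Int) :=
  let nums := xs.map (fun s => PySem.Str.split₀ (PySem.Str.stripChars s "\n"))
  nums.map (fun row => row.map (fun n => (PySem.Int.ofStr? n).getD 0))

def break_maps (lines : List String) : List (List (List Int)) :=
  ((PySem.List.pyRange 0 (lines.length : Int) 1).foldl
    (fun (st : List (List (List Int)) × Int) right =>
      if PySem.List.pyGetD lines right "" = "\n" then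
        (st.1 ++ [parseLinesA (PySem.List.slice lines (some (st.2 + 1)) (some right))], right + 1)
      else if right = (lines.length : Int) - 1 then
        (st.1 ++ [parseLinesA (PySem.List.slice lines (some (st.2 + 1)) (some (right + 1)))], st.2)
      else st)
    ([], 0)).1

-- ===== PORT B =====
-- [[int(n) for n in s.split()] for s in group[1:]]
def parseGroupB (g : List String) : List (List Int) :=
  (PySem.List.slice g (some 1) none).map
    (fun s => (PySem.Str.split₀ s).map (fun n => (PySem.Int.ofStr? n).getD 0))

def break_maps_alt (lines : List String) : List (List (List Int)) :=
  let st := lines.foldl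
    (fun (st : List (List (List Int)) × List String) line =>
      if line = "\n" then (st.1 ++ [parseGroupB st.2], [])
      else (st.1, st.2 ++ [line]))
    ([], [])
  if st.2.isEmpty then st.1 else st.1 ++ [parseGroupB st.2]

-- ===== PRECONDITION & SPEC =====
-- Pre_ excludes exactly the inputs on which Python's int() raises ValueError: some line that is
-- neither blank nor a group header (index 0 or right after a blank line) has a token that is not
-- an integer literal.  A returns normally on every other input.
def Pre_break_maps (lines : List String) : Prop :=
  ∀ i < lines.length, 0 < i → lines.getD i "" ≠ "\n" → lines.getD (i - 1) "" ≠ "\n" →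
    ∀ t ∈ PySem.Str.split₀ (lines.getD i ""), (PySem.Int.ofStr? t).isSome = true
instance (lines : List String) : Decidable (Pre_break_maps lines) := by
  unfold Pre_break_maps; infer_instance

def pvWitness_break_maps : List String :=
  ["seed-to-soil map:\n", "50 98 2\n", "52 50 48\n", "\n", "soil map:\n", "-7 0\n"]

def Spec_break_maps (lines : List String) (out : List (List (List Int))) : Prop := out = break_maps_alt lines
instance (lines : List String) (out : List (List (List Int))) : Decidable (Spec_break_maps lines out) := by unfold Spec_break_maps; infer_instance

-- ===== CLAIM (what is proved, stated in full; the proofs are below) =====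
def Claim_equal_break_maps : Prop := ∀ (lines : List String), Dom_break_maps lines → Pre_break_maps lines → Spec_break_maps lines (break_maps lines)

-- ===== LEMMAS AND PROOFS =====

-- stripping '\n' (whitespace) from either end does not change s.split()
lemma splitgo_of_all_space (ws : List Char) (hws : ∀ c ∈ ws, PySem.Chars.isspace c = true) :
    ∀ acc, PySem.Chars.split₀.go ws [] acc = acc.reverse := by
  induction ws with
  | nil => intro acc; simp [PySem.Chars.split₀.go]
  | cons c rest ih =>
    intro acc
    have hc := hws c (by simp)
    simp only [PySem.Chars.split₀.go, hc, if_pos, List.isEmpty_nil]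
    simpa using ih (fun c hc => hws c (by simp [hc])) acc

lemma splitgo_append_space (ws : List Char) (hws : ∀ c ∈ ws, PySem.Chars.isspace c = true) :
    ∀ (t cur : List Char) (acc : List (List Char)),
      PySem.Chars.split₀.go (t ++ ws) cur acc = PySem.Chars.split₀.go t cur acc := by
  intro t
  induction t with
  | nil =>
    intro cur acc
    cases ws with
    | nil => rfl
    | cons c rest =>
      have hc := hws c (by simp)
      have hrest : ∀ c ∈ rest, PySem.Chars.isspace c = true := fun c hc => hws c (by simp [hc])
      by_cases hcur : cur = []
      · subst hcur
        simp [PySem.Chars.split₀.go, hc, splitgo_of_all_space rest hrest]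
      · simp [PySem.Chars.split₀.go, hc, List.isEmpty_iff, hcur,
              splitgo_of_all_space rest hrest]
  | cons c t ih =>
    intro cur acc
    by_cases hc : PySem.Chars.isspace c = true
    · by_cases hcur : cur = [] <;>
        simp [PySem.Chars.split₀.go, hc, hcur, List.isEmpty_iff, ih]
    · simp [PySem.Chars.split₀.go, hc, ih]

lemma splitgo_dropWhile (p : Char → Bool) (hp : ∀ c, p c = true → PySem.Chars.isspace c = true) :
    ∀ (s : List Char) (acc : List (List Char)),
      PySem.Chars.split₀.go (s.dropWhile p) [] acc = PySem.Chars.split₀.go s [] acc := by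
  intro s
  induction s with
  | nil => intro acc; rfl
  | cons c rest ih =>
    intro acc
    by_cases hc : p c = true
    · simp [hc, PySem.Chars.split₀.go, hp c hc, ih]
    · simp [hc]

lemma chars_split_strip_nl (cs : List Char) :
    PySem.Chars.split₀ (PySem.Chars.stripChars cs ['\n']) = PySem.Chars.split₀ cs := by
  have hp : ∀ c : Char, (['\n'].contains c) = true → PySem.Chars.isspace c = true := by
    intro c hc
    simp only [List.contains_cons, List.contains_nil, Bool.or_false, beq_iff_eq] at hc
    subst hc; decide
  unfold PySem.Chars.stripChars PySem.Chars.split₀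
  set p : Char → Bool := fun c => (['\n'].contains c) with hpdef
  set u := List.dropWhile p cs with hu
  have hsplit : u = (List.dropWhile p u.reverse).reverse ++ (List.takeWhile p u.reverse).reverse := by
    conv_lhs => rw [← u.reverse_reverse, ← List.takeWhile_append_dropWhile (p := p) (l := u.reverse)]
    rw [List.reverse_append]
  have hws : ∀ c ∈ (List.takeWhile p u.reverse).reverse, PySem.Chars.isspace c = true := by
    intro c hc
    exact hp c (List.mem_takeWhile_imp (by simpa using hc))
  calc PySem.Chars.split₀.go (List.dropWhile p u.reverse).reverse [] []
      = PySem.Chars.split₀.go ((List.dropWhile p u.reverse).reverse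
          ++ (List.takeWhile p u.reverse).reverse) [] [] :=
        (splitgo_append_space _ hws _ _ _).symm
    _ = PySem.Chars.split₀.go u [] [] := by rw [← hsplit]
    _ = PySem.Chars.split₀.go cs [] [] := by rw [hu]; exact splitgo_dropWhile p hp cs []

lemma split_strip_nl (s : String) :
    PySem.Str.split₀ (PySem.Str.stripChars s "\n") = PySem.Str.split₀ s := by
  simp only [PySem.Str.split₀, PySem.Str.stripChars]
  rw [show (String.ofList (PySem.Chars.stripChars s.toList "\n".toList)).toList
        = PySem.Chars.stripChars s.toList "\n".toList by simp]
  rw [show ("\n".toList : List Char) = ['\n'] from rfl, chars_split_strip_nl]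

-- A's parse of a tail slice is B's parse of the whole group
lemma parseA_eq_parseB_tail (g : List String) :
    parseLinesA (g.drop 1) = parseGroupB g := by
  simp only [parseLinesA, parseGroupB, PySem.List.slice_from_one, List.map_map, List.drop_one]
  exact List.map_congr_left (fun s _ => by
    simp only [Function.comp_apply]
    rw [split_strip_nl])

-- the recursive form of B's loop, and its final flush
def bFlush (st : List (List (List Int)) × List String) : List (List (List Int)) :=
  if st.2.isEmpty then st.1 else st.1 ++ [parseGroupB st.2]

def bGo : List String → List String → List (List (List Int))
  | [], g => if g.isEmpty then [] else [parseGroupB g]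
  | l :: rest, g => if l = "\n" then parseGroupB g :: bGo rest [] else bGo rest (g ++ [l])

lemma alt_foldl_eq_bGo (ls : List String) : ∀ (maps : List (List (List Int))) (g : List String),
    bFlush (ls.foldl
        (fun (st : List (List (List Int)) × List String) line =>
          if line = "\n" then (st.1 ++ [parseGroupB st.2], [])
          else (st.1, st.2 ++ [line]))
        (maps, g)) = maps ++ bGo ls g := by
  induction ls with
  | nil =>
    intro maps g
    by_cases hg : g = [] <;> simp [bGo, bFlush, hg, List.isEmpty_iff]
  | cons l rest ih =>
    intro maps g
    simp only [List.foldl_cons]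
    by_cases hl : l = "\n"
    · rw [if_pos hl, ih (maps ++ [parseGroupB g]) []]
      simp [bGo, hl]
    · rw [if_neg hl, ih maps (g ++ [l])]
      simp [bGo, hl]

lemma slice_succ_right (L : List String) (a r : Nat) (ha : a ≤ r) (hr : r < L.length) :
    PySem.List.slice L (some (a : Int)) (some ((r + 1 : Nat) : Int))
      = PySem.List.slice L (some (a : Int)) (some (r : Int)) ++ [L[r]] := by
  rw [PySem.List.slice_natCast, PySem.List.slice_natCast]
  have h1 : r + 1 - a = (r - a) + 1 := by omega
  rw [h1, List.take_add_one]
  have hidx : (L.drop a)[r - a]? = some L[r] := by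
    rw [List.getElem?_drop]
    have h2 : a + (r - a) = r := by omega
    rw [h2, List.getElem?_eq_getElem hr]
  rw [hidx]
  rfl

lemma slice_drop_one (L : List String) (a r : Nat) :
    PySem.List.slice L (some ((a : Int) + 1)) (some (r : Int))
      = (PySem.List.slice L (some (a : Int)) (some (r : Int))).drop 1 := by
  rw [show ((a : Int) + 1) = ((a + 1 : Nat) : Int) by push_cast; ring]
  rw [PySem.List.slice_natCast, PySem.List.slice_natCast]
  rw [List.drop_take, List.drop_drop]
  congr 1

-- the main invariant: A's remaining loop from index r, with left pointer a, computes maps ++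
-- B's recursion on the remaining lines with the currently collected group L[a:r]
lemma ago_eq_bGo (L : List String) : ∀ (k r a : Nat) (maps : List (List (List Int))),
    r + k = L.length → a ≤ r → (r < L.length ∨ a = r) →
    ((PySem.List.pyRange (r : Int) (L.length : Int) 1).foldl
      (fun (st : List (List (List Int)) × Int) right =>
        if PySem.List.pyGetD L right "" = "\n" then
          (st.1 ++ [parseLinesA (PySem.List.slice L (some (st.2 + 1)) (some right))], right + 1)
        else if right = (L.length : Int) - 1 then
          (st.1 ++ [parseLinesA (PySem.List.slice L (some (st.2 + 1)) (some (right + 1)))], st.2)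
        else st)
      (maps, (a : Int))).1
    = maps ++ bGo (L.drop r) (PySem.List.slice L (some (a : Int)) (some (r : Int))) := by
  intro k
  induction k with
  | zero =>
    intro r a maps hk ha hra
    have hr : r = L.length := by omega
    have haa : a = r := by omega
    subst haa
    rw [PySem.List.pyRange_one_eq_nil (by omega)]
    simp [hr, bGo, PySem.List.slice_natCast]
  | succ k ih =>
    intro r a maps hk ha hra
    have hrlt : r < L.length := by omega
    rw [PySem.List.pyRange_one_cons (by exact_mod_cast hrlt)]
    rw [List.foldl_cons]
    have hget : PySem.List.pyGetD L (r : Int) "" = L[r] := by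
      rw [PySem.List.pyGetD_natCast]
      exact List.getD_eq_getElem L "" hrlt
    have hdropr : L.drop r = L[r] :: L.drop (r + 1) := List.drop_eq_getElem_cons hrlt
    have hcast : ((r : Int) + 1) = ((r + 1 : Nat) : Int) := by push_cast; ring
    by_cases hnl : L[r] = "\n"
    · -- blank line: flush the current group
      rw [hget, if_pos hnl, slice_drop_one L a r, hcast,
          ih (r + 1) (r + 1) _ (by omega) le_rfl (by omega), hdropr]
      rw [show PySem.List.slice L (some ((r + 1 : Nat) : Int)) (some ((r + 1 : Nat) : Int))
            = ([] : List String) by rw [PySem.List.slice_natCast]; simp]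
      simp only [bGo, if_pos hnl, parseA_eq_parseB_tail]
      simp
    · rw [hget, if_neg hnl]
      by_cases hlast : r = L.length - 1
      · -- last line, not blank: final flush; the remaining range is empty
        rw [if_pos (show (r : Int) = (L.length : Int) - 1 by omega)]
        rw [PySem.List.pyRange_one_eq_nil (by omega)]
        simp only [List.foldl_nil]
        rw [hdropr, show L.drop (r + 1) = [] by rw [List.drop_eq_nil_iff]; omega]
        simp only [bGo, if_neg hnl]
        rw [hcast, slice_drop_one L a (r + 1), parseA_eq_parseB_tail,
            slice_succ_right L a r ha hrlt]
        have hne : (PySem.List.slice L (some (a : Int)) (some (r : Int)) ++ [L[r]]).isEmpty = false := by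
          simp
        rw [if_neg (by simp [hne])]
      · -- middle line, not blank: keep collecting
        rw [if_neg (show (r : Int) ≠ (L.length : Int) - 1 by omega)]
        rw [hcast, ih (r + 1) a maps (by omega) (by omega) (by omega), hdropr]
        simp only [bGo, if_neg hnl]
        rw [slice_succ_right L a r ha hrlt]

-- ===== VERDICT (by name: the statement is the Claim_ definition above) =====
theorem break_maps_spec : Claim_equal_break_maps := by
  intro lines _ _
  unfold Spec_break_maps break_maps
  have hb : break_maps_alt lines = bFlush (List.foldl
      (fun (st : List (List (List Int)) × List String) (line : String) =>
        if line = "\n" then (st.1 ++ [parseGroupB st.2], [])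
        else (st.1, st.2 ++ [line]))
      ([], []) lines) := rfl
  rw [hb, alt_foldl_eq_bGo lines [] []]
  have ha := ago_eq_bGo lines lines.length 0 0 [] (by omega) (by omega)
    (by rcases Nat.eq_zero_or_pos lines.length with h | h
        · right; omega
        · left; omega)
  rw [show ((0 : Nat) : Int) = (0 : Int) from rfl] at ha
  rw [ha]
  have h0 : PySem.List.slice lines (some (0 : Int)) (some (0 : Int)) = ([] : List String) := by
    rw [show (0 : Int) = ((0 : Nat) : Int) from rfl, PySem.List.slice_natCast]
    simp
  rw [h0, List.drop_zero, List.nil_append]
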